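-- pv_equiv track=rewrite | github.com/raymondchiang/calc-tdd | calc/__main__.py | pare
-- ===== SOURCE A (Python) =====
-- def pare(statement):   # parentheses " () ", To judge have parentheses or not
--     fir_par_loc=0      # --->" ( "
--     end_par_loc=0      # --->" ) "
--     curr_par=0		   #content in one of parentheses
--     have_par=False
--     for x in range(len(statement)):
--         if statement[x]=='(':
--             have_par=True
--             fir_par_loc=x
--             curr_par+=1
--         if statement[x]==')':
--             break
--         elif curr_par==2:
--             curr_par=0
--         end_par_loc+=1
--     if have_par:
--         return (fir_par_loc,end_par_loc)
--     else:
--         return (None,None)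
-- ===== SOURCE B (Python) =====
-- def pare(statement):
--     end = next((i for i, c in enumerate(statement) if c == ')'), len(statement))
--     fir = next((i for i in range(end - 1, -1, -1) if statement[i] == '('), None)
--     if fir is None:
--         return (None, None)
--     return (fir, end)
-- ===== Notes on version B (the rewrite author's own statement) =====
-- stated objective: simpler
-- what changed: Replaces A's single stateful scan (break flag, running counters, dead curr_par state) by two independent scans: a forward scan for the first ')' and a backward scan over the prefix for the last '(' before it.
import Mathlib
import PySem

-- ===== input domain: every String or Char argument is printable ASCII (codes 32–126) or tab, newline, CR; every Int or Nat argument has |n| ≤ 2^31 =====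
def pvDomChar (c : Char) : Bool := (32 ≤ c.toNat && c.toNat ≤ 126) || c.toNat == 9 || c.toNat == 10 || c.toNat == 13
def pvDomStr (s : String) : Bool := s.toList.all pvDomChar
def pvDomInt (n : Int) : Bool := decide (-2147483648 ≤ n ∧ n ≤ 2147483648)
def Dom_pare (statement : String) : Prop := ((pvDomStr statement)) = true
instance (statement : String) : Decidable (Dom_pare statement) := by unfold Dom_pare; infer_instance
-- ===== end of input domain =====

-- B replaces A's single stateful scan with two independent scans (first ')' forward, last '(' backward); simpler, same cost.

-- ===== PORT A =====
-- A's for-loop over range(len(statement)) with its four state variables; the break on ')' returns early.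
def pareLoop (cs : List Char) (x fir endl curr : Int) (hv : Bool) : Int × Int × Bool :=
  match cs with
  | [] => (fir, endl, hv)
  | c :: rest =>
    let hv' := if c = '(' then true else hv
    let fir' := if c = '(' then x else fir
    let curr1 := if c = '(' then curr + 1 else curr
    if c = ')' then (fir', endl, hv')
    else
      let curr2 := if curr1 = 2 then 0 else curr1
      pareLoop rest (x + 1) fir' (endl + 1) curr2 hv'

def pare (statement : String) : Option Int × Option Int :=
  let r := pareLoop statement.toList 0 0 0 0 false
  if r.2.2 then (some r.1, some r.2.1) else (none, none)

-- ===== PORT B =====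
-- forward scan: index of the first ')' starting at position i (i + length if none)
def findClose (cs : List Char) (i : Int) : Int :=
  match cs with
  | [] => i
  | c :: rest => if c = ')' then i else findClose rest (i + 1)

-- backward scan over a reversed prefix: i is the index of the head element, decreasing
def findOpenRev (cs : List Char) (i : Int) : Option Int :=
  match cs with
  | [] => none
  | c :: rest => if c = '(' then some i else findOpenRev rest (i - 1)

def pare_alt (statement : String) : Option Int × Option Int :=
  let cs := statement.toList
  let e := findClose cs 0
  match findOpenRev ((cs.take e.toNat).reverse) (e - 1) with
  | none => (none, none)
  | some f => (some f, some e)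

-- ===== PRECONDITION & SPEC =====
def Spec_pare (statement : String) (out : Option Int × Option Int) : Prop := out = pare_alt statement
instance (statement : String) (out : Option Int × Option Int) : Decidable (Spec_pare statement out) := by unfold Spec_pare; infer_instance

-- ===== CLAIM (what is proved, stated in full; the proofs are below) =====
def Claim_equal_pare : Prop := ∀ (statement : String), Dom_pare statement → Spec_pare statement (pare statement)

-- ===== LEMMAS AND PROOFS =====

theorem findClose_ge (cs : List Char) (i : Int) : i ≤ findClose cs i := by
  induction cs generalizing i with
  | nil => simp [findClose]
  | cons c rest ih =>
    simp only [findClose]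
    split
    · omega
    · have := ih (i + 1); omega

theorem findClose_le (cs : List Char) (i : Int) : findClose cs i ≤ i + cs.length := by
  induction cs generalizing i with
  | nil => simp [findClose]
  | cons c rest ih =>
    simp only [findClose, List.length_cons]
    split
    · push_cast; omega
    · have := ih (i + 1); push_cast at *; omega

theorem findOpenRev_append (l : List Char) (c : Char) (i : Int) :
    findOpenRev (l ++ [c]) i =
      match findOpenRev l i with
      | some f => some f
      | none => if c = '(' then some (i - l.length) else none := by
  induction l generalizing i with
  | nil => simp [findOpenRev]
  | cons d rest ih =>
    simp only [List.cons_append, findOpenRev]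
    split
    · rfl
    · rw [ih]; simp only [List.length_cons]
      split <;> (try rfl)
      split <;> (push_cast; ring_nf)

theorem pareLoop_eq (cs : List Char) (x fir curr : Int) (hv : Bool) :
    pareLoop cs x fir x curr hv =
      (let e := findClose cs x
       match findOpenRev ((cs.take (e - x).toNat).reverse) (e - 1) with
       | some f => (f, e, true)
       | none => (fir, e, hv)) := by
  induction cs generalizing x fir curr hv with
  | nil => simp [pareLoop, findClose, findOpenRev]
  | cons c rest ih =>
    simp only [pareLoop, findClose]
    by_cases hc : c = ')'
    · have hco : ¬ c = '(' := by subst hc; decide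
      simp [hc, hco, findOpenRev]
    · simp only [if_neg hc]
      rw [ih]
      have hge : x + 1 ≤ findClose rest (x + 1) := findClose_ge rest (x + 1)
      have hle : findClose rest (x + 1) ≤ x + 1 + rest.length := findClose_le rest (x + 1)
      set e := findClose rest (x + 1) with he
      have htake : (c :: rest).take (e - x).toNat = c :: rest.take (e - (x + 1)).toNat := by
        have h1 : (e - x).toNat = (e - (x + 1)).toNat + 1 := by omega
        rw [h1, List.take_succ_cons]
      rw [htake]
      simp only [List.reverse_cons]
      rw [findOpenRev_append]
      have hlen : ((rest.take (e - (x + 1)).toNat).length : Int) = e - (x + 1) := by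
        rw [List.length_take]
        have : (e - (x + 1)).toNat ≤ rest.length := by omega
        simp [Nat.min_eq_left this]; omega
      by_cases hco : c = '('
      · simp only [hco, if_pos rfl]
        cases hfo : findOpenRev ((rest.take (e - (x + 1)).toNat).reverse) (e - 1) with
        | none => simp [hfo]; omega
        | some f => simp [hfo]
      · simp only [if_neg hco]
        cases hfo : findOpenRev ((rest.take (e - (x + 1)).toNat).reverse) (e - 1) with
        | none => simp [hfo]
        | some f => simp [hfo]

-- ===== VERDICT (by name: the statement is the Claim_ definition above) =====
theorem pare_spec : Claim_equal_pare := by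
  intro statement _
  unfold Spec_pare pare pare_alt
  rw [pareLoop_eq]
  simp only []
  have h0 : (findClose statement.toList 0 - 0) = findClose statement.toList 0 := by ring
  rw [h0]
  cases hfo : findOpenRev ((statement.toList.take (findClose statement.toList 0).toNat).reverse)
      (findClose statement.toList 0 - 1) <;> simp [hfo]
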